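-- pv_equiv track=rewrite | github.com/aczelandi/aoc-2024 | aoc2024/day_2/solution.py | _is_fully_valid
-- ===== SOURCE A (Python) =====
-- def _is_fully_valid(report: list[int]) -> bool:
--     if len(report) == 0 or len(report) == 1:
--         return True
--
--     diffs = []
--     positive_count = 0
--     negative_count = 0
--     for i in range(1, len(report)):
--         diff = report[i] - report[i - 1]
--         if abs(diff) < 1 or abs(diff) > 3:
--             return False
--         diffs.append(diff)
--         if diff >= 0:
--             positive_count += 1
--         else:
--             negative_count += 1
--
--     return positive_count == len(diffs) or negative_count == len(diffs)
-- ===== SOURCE B (Python) =====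
-- def _is_fully_valid(report: list[int]) -> bool:
--     diffs = [b - a for a, b in zip(report, report[1:])]
--     if not all(1 <= abs(d) <= 3 for d in diffs):
--         return False
--     return report == sorted(report) or report == sorted(report, reverse=True)
-- ===== Notes on version B (the rewrite author's own statement) =====
-- stated objective: alternative
-- what changed: Replaces the single sign-counting loop with early return by an adjacent-difference magnitude check followed by a sort-and-compare monotonicity test (report == sorted(report) ascending or descending), valid because zero diffs are already rejected.
import Mathlib
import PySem

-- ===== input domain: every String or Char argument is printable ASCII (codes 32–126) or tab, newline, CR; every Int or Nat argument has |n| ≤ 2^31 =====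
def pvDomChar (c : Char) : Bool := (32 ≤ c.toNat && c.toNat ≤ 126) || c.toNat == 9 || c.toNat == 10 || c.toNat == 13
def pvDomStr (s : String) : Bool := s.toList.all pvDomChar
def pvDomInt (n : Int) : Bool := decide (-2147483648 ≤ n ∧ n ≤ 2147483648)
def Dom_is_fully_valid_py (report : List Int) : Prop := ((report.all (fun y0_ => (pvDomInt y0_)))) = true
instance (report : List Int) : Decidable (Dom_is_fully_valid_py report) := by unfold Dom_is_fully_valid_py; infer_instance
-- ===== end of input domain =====

-- B replaces A's sign-counting loop by a magnitude check on adjacent differences plus a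
-- sort-and-compare monotonicity test (alternative decomposition; not claimed faster).

-- ===== PORT A =====
-- literal transliteration of A's indexed loop with early return (early return = sticky `none` state)
def is_fully_valid_py (report : List Int) : Bool :=
  if report.length = 0 ∨ report.length = 1 then true
  else
    match (PySem.List.pyRange 1 (report.length : Int) 1).foldl
      (fun st i =>
        match st with
        | none => none
        | some (diffs, pos, neg) =>
          let diff := PySem.List.pyGetD report i 0 - PySem.List.pyGetD report (i - 1) 0
          if |diff| < 1 ∨ |diff| > 3 then none
          else some (diffs ++ [diff],
                     (if 0 ≤ diff then pos + 1 else pos),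
                     (if 0 ≤ diff then neg else neg + 1)))
      (some (([] : List Int), (0 : Int), (0 : Int))) with
    | none => false
    | some (diffs, pos, neg) =>
      (pos == (diffs.length : Int)) || (neg == (diffs.length : Int))

-- ===== PORT B =====
def is_fully_valid_py_alt (report : List Int) : Bool :=
  let diffs := (report.zip (PySem.List.slice report (some 1) none)).map (fun p => p.2 - p.1)
  if !(diffs.all (fun d => decide (1 ≤ |d| ∧ |d| ≤ 3))) then false
  else (report == PySem.List.sorted report (fun x => x) false)
        || (report == PySem.List.sorted report (fun x => x) true)

-- ===== PRECONDITION & SPEC =====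
def Spec_is_fully_valid_py (report : List Int) (out : Bool) : Prop := out = is_fully_valid_py_alt report
instance (report : List Int) (out : Bool) : Decidable (Spec_is_fully_valid_py report out) := by unfold Spec_is_fully_valid_py; infer_instance

-- ===== CLAIM (what is proved, stated in full; the proofs are below) =====
def Claim_equal_is_fully_valid_py : Prop := ∀ (report : List Int), Dom_is_fully_valid_py report → Spec_is_fully_valid_py report (is_fully_valid_py report)

-- ===== LEMMAS AND PROOFS =====

-- A's loop body, rephrased on the adjacent pair it reads (proved equal to A's fold below)
def pvStep (st : Option (List Int × Int × Int)) (p : Int × Int) : Option (List Int × Int × Int) :=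
  match st with
  | none => none
  | some (diffs, pos, neg) =>
    let diff := p.2 - p.1
    if |diff| < 1 ∨ |diff| > 3 then none
    else some (diffs ++ [diff],
               (if 0 ≤ diff then pos + 1 else pos),
               (if 0 ≤ diff then neg else neg + 1))

theorem pv_pairs_map (report : List Int) :
    (PySem.List.pyRange 1 (report.length : Int) 1).map
      (fun i => (PySem.List.pyGetD report (i - 1) 0, PySem.List.pyGetD report i 0))
      = report.zip (report.drop 1) := by
  apply List.ext_getElem
  · simp [PySem.List.length_pyRange_one]
  · intro k h1 h2
    have hk : k < report.length - 1 := by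
      simpa [PySem.List.length_pyRange_one] using h1
    have hk1 : k < report.length := by omega
    have hk2 : k + 1 < report.length := by omega
    simp only [List.getElem_map, PySem.List.getElem_pyRange_one, List.getElem_zip,
      List.getElem_drop]
    have e1 : (1 : Int) + (k : Int) - 1 = ((k : Nat) : Int) := by ring
    have e2 : (1 : Int) + (k : Int) = (((k + 1 : Nat)) : Int) := by push_cast; ring
    rw [e1, e2, PySem.List.pyGetD_natCast, PySem.List.pyGetD_natCast]
    have e3 : 1 + k = k + 1 := by omega
    simp [List.getD_eq_getElem?_getD, List.getElem?_eq_getElem hk1,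
      List.getElem?_eq_getElem hk2, e3]

theorem pvStep_none (ps : List (Int × Int)) : ps.foldl pvStep none = none := by
  induction ps with
  | nil => rfl
  | cons p ps ih => simpa [pvStep] using ih

def pvGood (d : Int) : Bool := decide (1 ≤ |d| ∧ |d| ≤ 3)

theorem pv_good_iff (d : Int) : pvGood d = true ↔ ¬(|d| < 1 ∨ |d| > 3) := by
  rcases abs_cases d with ⟨h1, _⟩ | ⟨h1, _⟩ <;> simp [pvGood, h1]


theorem pvFold_char (ps : List (Int × Int)) (diffs : List Int) (pos neg : Int) :
    ps.foldl pvStep (some (diffs, pos, neg)) =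
      if ps.all (fun p => pvGood (p.2 - p.1)) then
        some (diffs ++ ps.map (fun p => p.2 - p.1),
              pos + ((ps.map (fun p => p.2 - p.1)).countP (fun d => decide (0 ≤ d)) : Int),
              neg + ((ps.map (fun p => p.2 - p.1)).countP (fun d => decide (d < 0)) : Int))
      else none := by
  induction ps generalizing diffs pos neg with
  | nil => simp
  | cons p ps ih =>
    by_cases hg : pvGood (p.2 - p.1)
    · have hnb : ¬ (|p.2 - p.1| < 1 ∨ |p.2 - p.1| > 3) := by
        simp [pvGood] at hg; omega
      have hstep : pvStep (some (diffs, pos, neg)) p =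
        some (diffs ++ [p.2 - p.1],
              (if 0 ≤ p.2 - p.1 then pos + 1 else pos),
              (if 0 ≤ p.2 - p.1 then neg else neg + 1)) := by
        simp only [pvStep]
        rw [if_neg hnb]
      rw [List.foldl_cons, hstep]
      rw [ih]
      by_cases hall : ps.all (fun p => pvGood (p.2 - p.1))
      · simp only [List.all_cons, hg, hall, Bool.and_self, if_pos, List.map_cons,
          List.countP_cons]
        by_cases hd : 0 ≤ p.2 - p.1
        · have hle : p.1 ≤ p.2 := by omega
          simp [hle, List.append_assoc]
          omega
        · have hle : ¬ (p.1 ≤ p.2) := by omega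
          simp [hle, List.append_assoc]
          omega
      · simp [hg, hall]
    · have hb : (|p.2 - p.1| < 1 ∨ |p.2 - p.1| > 3) := by
        by_contra hnb; exact hg ((pv_good_iff _).mpr hnb)
      have hstep : pvStep (some (diffs, pos, neg)) p = none := by
        simp only [pvStep]
        rw [if_pos hb]
      rw [List.foldl_cons, hstep, pvStep_none]
      simp [hg]

-- all adjacent diffs ≥ 0  ↔  the list is (non-strictly) sorted ascending
theorem pv_asc_iff (report : List Int)
    (h : ∀ d ∈ (report.zip (report.drop 1)).map (fun p => p.2 - p.1), (0:Int) ≤ d) :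
    report.Pairwise (· ≤ ·) := by
  rw [← List.isChain_iff_pairwise]
  rw [List.isChain_iff_getElem]
  intro i hi
  have := h (report[i + 1] - report[i]) (by
    refine List.mem_map.mpr ⟨(report[i], report[i+1]), ?_, rfl⟩
    rw [List.mem_iff_getElem]
    exact ⟨i, by simp; omega, by simp [List.getElem_zip]⟩)
  omega

theorem pv_desc_iff (report : List Int)
    (h : ∀ d ∈ (report.zip (report.drop 1)).map (fun p => p.2 - p.1), d < (0:Int)) :
    report.Pairwise (fun a b => b ≤ a) := by
  rw [← List.isChain_iff_pairwise]
  rw [List.isChain_iff_getElem]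
  intro i hi
  have := h (report[i + 1] - report[i]) (by
    refine List.mem_map.mpr ⟨(report[i], report[i+1]), ?_, rfl⟩
    rw [List.mem_iff_getElem]
    exact ⟨i, by simp; omega, by simp [List.getElem_zip]⟩)
  omega

theorem pv_sorted_asc (report : List Int) (h : report = PySem.List.sorted report (fun x => x) false)
    (i : Nat) (hi : i + 1 < report.length) : report[i] ≤ report[i + 1] := by
  have hp : report.Pairwise (fun a b => a ≤ b) := by
    rw [h]; exact PySem.List.sorted_pairwise report (fun x => x) 
  have := List.isChain_iff_getElem.mp (List.isChain_iff_pairwise.mpr hp) i hi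
  simpa using this

theorem pv_sorted_desc (report : List Int) (h : report = PySem.List.sorted report (fun x => x) true)
    (i : Nat) (hi : i + 1 < report.length) : report[i + 1] ≤ report[i] := by
  have hp : report.Pairwise (fun a b => b ≤ a) := by
    rw [h]; exact PySem.List.sorted_pairwise_rev report (fun x => x)
  have := List.isChain_iff_getElem.mp (List.isChain_iff_pairwise.mpr hp) i hi
  simpa using this

-- ===== VERDICT (by name: the statement is the Claim_ definition above) =====
theorem is_fully_valid_py_spec : Claim_equal_is_fully_valid_py := by
  intro report _
  unfold Spec_is_fully_valid_py is_fully_valid_py is_fully_valid_py_alt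
  rw [PySem.List.slice_from_one, ← List.drop_one]
  have hfold :
      (PySem.List.pyRange 1 (report.length : Int) 1).foldl
        (fun st i =>
          match st with
          | none => none
          | some (diffs, pos, neg) =>
            let diff := PySem.List.pyGetD report i 0 - PySem.List.pyGetD report (i - 1) 0
            if |diff| < 1 ∨ |diff| > 3 then none
            else some (diffs ++ [diff],
                       (if 0 ≤ diff then pos + 1 else pos),
                       (if 0 ≤ diff then neg else neg + 1)))
        (some (([] : List Int), (0 : Int), (0 : Int)))
      = (report.zip (report.drop 1)).foldl pvStep
          (some (([] : List Int), (0 : Int), (0 : Int))) := by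
    rw [← pv_pairs_map report, List.foldl_map]
    rfl
  rw [hfold, pvFold_char]
  set ps := report.zip (report.drop 1) with hps
  set ds := ps.map (fun p => p.2 - p.1) with hds
  by_cases hall : ps.all (fun p => pvGood (p.2 - p.1))
  · have hall' : ds.all (fun d => decide (1 ≤ |d| ∧ |d| ≤ 3)) = true := by
      simp only [hds, List.all_map]
      exact hall
    rw [if_pos hall]
    simp only [hall', Bool.not_true, Bool.false_eq_true, if_false]
    have hlen : ds.length = report.length - 1 := by
      simp [hds, hps]
    by_cases h01 : report.length = 0 ∨ report.length = 1
    · rw [if_pos h01]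
      have hsort : PySem.List.sorted report (fun x => x) false = report := by
        apply PySem.List.sorted_eq_self_of_pairwise
        rcases report with _ | ⟨a, _ | ⟨b, t⟩⟩ <;> simp_all
      simp [hsort]
    · rw [if_neg h01]
      -- nonzero diffs
      have hnz : ∀ d ∈ ds, d ≠ 0 := by
        intro d hd
        have := List.all_eq_true.mp hall'
        have h2 := this d hd
        simp at h2
        rcases abs_cases d with ⟨ha, _⟩ | ⟨ha, _⟩ <;> omega
      -- A's result: count equalities vs B's sorted comparisons
      have hA1 : ((0:Int) + (ds.countP (fun d => decide (0 ≤ d)) : Int) == (ds.length : Int))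
          = (report == PySem.List.sorted report (fun x => x) false) := by
        rw [Bool.eq_iff_iff]
        simp only [beq_iff_eq]
        constructor
        · intro hc
          have hcnt : ds.countP (fun d => decide (0 ≤ d)) = ds.length := by omega
          have hall0 : ∀ d ∈ ds, (0:Int) ≤ d :=
            fun d hd => by simpa using (List.countP_eq_length.mp hcnt) d hd
          exact (PySem.List.sorted_eq_self_of_pairwise report (fun x => x) (pv_asc_iff report hall0)).symm
        · intro hb'
          have hall0 : ∀ d ∈ ds, (0:Int) ≤ d := by
            intro d hd
            rw [hds] at hd
            obtain ⟨p, hp, rfl⟩ := List.mem_map.mp hd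
            rw [hps, List.mem_iff_getElem] at hp
            obtain ⟨i, hi, hpe⟩ := hp
            have hi' : i + 1 < report.length := by
              simp at hi; omega
            have := pv_sorted_asc report hb' i hi'
            rw [← hpe]
            simp [List.getElem_zip]
            omega
          have : ds.countP (fun d => decide (0 ≤ d)) = ds.length :=
            List.countP_eq_length.mpr (fun d hd => by simpa using hall0 d hd)
          omega
      have hA2 : ((0:Int) + (ds.countP (fun d => decide (d < 0)) : Int) == (ds.length : Int))
          = (report == PySem.List.sorted report (fun x => x) true) := by
        rw [Bool.eq_iff_iff]
        simp only [beq_iff_eq]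
        constructor
        · intro hc
          have hcnt : ds.countP (fun d => decide (d < 0)) = ds.length := by omega
          have hall0 : ∀ d ∈ ds, d < (0:Int) :=
            fun d hd => by simpa using (List.countP_eq_length.mp hcnt) d hd
          exact (PySem.List.sorted_rev_eq_self_of_pairwise report (fun x => x) (pv_desc_iff report hall0)).symm
        · intro hb'
          have hall0 : ∀ d ∈ ds, d < (0:Int) := by
            intro d hd
            have hdnz := hnz d hd
            rw [hds] at hd
            obtain ⟨p, hp, rfl⟩ := List.mem_map.mp hd
            rw [hps, List.mem_iff_getElem] at hp
            obtain ⟨i, hi, hpe⟩ := hp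
            have hi' : i + 1 < report.length := by
              simp at hi; omega
            have := pv_sorted_desc report hb' i hi'
            rw [← hpe] at hdnz ⊢
            simp [List.getElem_zip] at hdnz ⊢
            omega
          have : ds.countP (fun d => decide (d < 0)) = ds.length :=
            List.countP_eq_length.mpr (fun d hd => by simpa using hall0 d hd)
          omega
      simp only [List.nil_append]
      rw [hA1, hA2]
  · have hall' : ds.all (fun d => decide (1 ≤ |d| ∧ |d| ≤ 3)) = false := by
      simp only [hds, List.all_map]
      exact Bool.eq_false_iff.mpr hall
    have hne : ¬ (report.length = 0 ∨ report.length = 1) := by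
      intro h01
      have hpe : ps = [] := by
        rcases report with _ | ⟨a, t⟩
        · simp [hps]
        · rcases t with _ | ⟨b, u⟩
          · simp [hps]
          · simp at h01
      rw [hpe] at hall
      simp at hall
    have hnall : ¬ ∀ x ∈ ds, 1 ≤ |x| ∧ |x| ≤ 3 := by
      intro hx
      have : ds.all (fun d => decide (1 ≤ |d| ∧ |d| ≤ 3)) = true :=
        List.all_eq_true.mpr (fun d hd => by simpa using hx d hd)
      rw [this] at hall'
      cases hall'
    rw [if_neg hall, if_neg hne]
    simp
    intro hx
    exact ((hnall hx).elim)
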